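-- pv_equiv track=rewrite | github.com/k-harada/AtCoder | other_contests/UECCP-20250414/A.py | solve
-- ===== SOURCE A (Python) =====
-- def solve(s):
--     t = list(s).copy()
--     res = 0
--     for i, c in enumerate("atcoder"):
--         j = t.index(c)
--         t = t[:j] + t[j + 1:]
--         t = t[:i] + [c] + t[i:]
--         res += (j - i)
--     return res
-- ===== SOURCE B (Python) =====
-- def solve(s):
--     idx = [s.index(c) for c in "atcoder"]
--     res = 0
--     done = []
--     for j in idx:
--         res += j - sum(1 for k in done if k < j)
--         done.append(j)
--     return res
-- ===== Notes on version B (the rewrite author's own statement) =====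
-- stated objective: alternative
-- what changed: Replaces the selection-move list simulation (repeated slicing/reinsertion on a mutable copy) with a precomputed first-occurrence index table and an inversion-style count: each letter's displacement is its original index minus the number of earlier letters that started before it.
import Mathlib
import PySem

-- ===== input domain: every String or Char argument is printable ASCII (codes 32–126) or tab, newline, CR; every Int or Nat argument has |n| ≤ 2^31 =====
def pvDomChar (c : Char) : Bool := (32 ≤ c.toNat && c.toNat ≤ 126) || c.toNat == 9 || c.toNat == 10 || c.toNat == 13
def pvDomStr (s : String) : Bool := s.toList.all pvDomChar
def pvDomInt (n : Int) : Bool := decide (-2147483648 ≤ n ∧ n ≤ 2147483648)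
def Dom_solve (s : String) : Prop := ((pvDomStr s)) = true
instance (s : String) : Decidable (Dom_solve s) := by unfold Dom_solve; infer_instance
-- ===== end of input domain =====

set_option maxRecDepth 40000


-- B replaces A's selection-move list simulation by a first-occurrence index table plus an
-- inversion-style count (objective: alternative — a different algorithm of similar cost).

-- ===== PORT A =====
-- loop over enumerate("atcoder"): j = t.index(c); t = t[:j]+t[j+1:]; t = t[:i]+[c]+t[i:]; res += j-i
def solveLoop : List (Int × Char) → List Char → Int → Int
  | [], _, res => res
  | (i, c) :: rest, t, res =>
    match PySem.List.index? t c with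
    | none => res   -- Python raises ValueError here (excluded by Pre_solve)
    | some j =>
      let t1 := PySem.List.slice t none (some (j : Int)) ++ PySem.List.slice t (some ((j : Int) + 1)) none
      let t2 := PySem.List.slice t1 none (some i) ++ [c] ++ PySem.List.slice t1 (some i) none
      solveLoop rest t2 (res + ((j : Int) - i))

def solve (s : String) : Int :=
  solveLoop (PySem.List.enumerate "atcoder".toList 0) s.toList 0

-- ===== PORT B =====
-- idx = [s.index(c) for c in "atcoder"]; then res += j - sum(1 for k in done if k < j); done.append(j)
def altLoop : List Int → List Int → Int → Int
  | [], _, res => res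
  | j :: rest, done, res =>
      altLoop rest (done ++ [j]) (res + (j - (done.countP (fun k => decide (k < j)) : Int)))

def solve_alt (s : String) : Int :=
  let idx := "atcoder".toList.map (fun c =>
    match PySem.List.index? s.toList c with
    | some j => (j : Int)
    | none => 0)   -- Python raises ValueError here (excluded by Pre_solve)
  altLoop idx [] 0

-- ===== PRECONDITION & SPEC =====
-- Pre_: both programs call s.index(c) for each letter of "atcoder" and raise ValueError when
-- a letter is absent; Pre_ requires every letter of "atcoder" to occur in s.
def Pre_solve (s : String) : Prop := ("atcoder".toList.all (fun c => s.toList.contains c)) = true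
instance (s : String) : Decidable (Pre_solve s) := by unfold Pre_solve; infer_instance
def pvWitness_solve : String := "atcoder"

def Spec_solve (s : String) (out : Int) : Prop := out = solve_alt s
instance (s : String) (out : Int) : Decidable (Spec_solve s out) := by unfold Spec_solve; infer_instance

-- ===== CLAIM (what is proved, stated in full; the proofs are below) =====
def Claim_equal_solve : Prop := ∀ (s : String), Dom_solve s → Pre_solve s → Spec_solve s (solve s)

-- ===== LEMMAS AND PROOFS =====

-- residual list: s0 with the characters at the positions of S deleted
def resid (s0 : List Char) (n : Nat) (S : List Nat) : List Char :=
  ((s0.zipIdx n).filter (fun q => !(S.contains q.2))).map Prod.fst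

theorem resid_cons (x : Char) (xs : List Char) (n : Nat) (S : List Nat) :
    resid (x :: xs) n S =
      (if n ∈ S then [] else [x]) ++ resid xs (n + 1) S := by
  simp [resid, List.zipIdx_cons]
  by_cases h : n ∈ S <;> simp [h]

theorem resid_congr (s0 : List Char) (n : Nat) (S S' : List Nat)
    (h : ∀ p, n ≤ p → (p ∈ S ↔ p ∈ S')) : resid s0 n S = resid s0 n S' := by
  induction s0 generalizing n with
  | nil => rfl
  | cons x xs ih =>
    rw [resid_cons, resid_cons, ih (n+1) (fun p hp => h p (by omega))]
    by_cases hn : n ∈ S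
    · rw [if_pos hn, if_pos ((h n le_rfl).1 hn)]
    · rw [if_neg hn, if_neg (fun h' => hn ((h n le_rfl).2 h'))]

theorem mem_resid (s0 : List Char) (n : Nat) (S : List Nat) (c : Char)
    (hc : c ∈ s0) (hI : (n + s0.idxOf c) ∉ S) : c ∈ resid s0 n S := by
  induction s0 generalizing n with
  | nil => simp at hc
  | cons x xs ih =>
    rw [resid_cons]
    by_cases hx : x = c
    · subst hx
      have h0 : (x :: xs).idxOf x = 0 := by simp
      rw [h0] at hI
      simp only [Nat.add_zero] at hI
      simp [hI]
    · have h1 : (x :: xs).idxOf c = xs.idxOf c + 1 := by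
        simp [List.idxOf_cons, show (x == c) = false by simp [hx]]
      rw [h1] at hI
      have hc' : c ∈ xs := by cases hc with | head => exact absurd rfl hx | tail _ h => exact h
      have hI' : (n + 1 + xs.idxOf c) ∉ S := by
        intro h; exact hI (by rw [show n + (xs.idxOf c + 1) = n + 1 + xs.idxOf c by omega]; exact h)
      have := ih (n + 1) hc' hI'
      simp [this]

-- count split helper
theorem countP_window_split (S : List Nat) (n I : Nat) (h : n < I) :
    S.countP (fun p => decide (n ≤ p ∧ p < I)) =
      S.count n + S.countP (fun p => decide (n + 1 ≤ p ∧ p < I)) := by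
  induction S with
  | nil => simp
  | cons a S ih =>
    rw [List.countP_cons, List.countP_cons, List.count_cons, ih]
    split_ifs <;> simp only [decide_eq_true_eq, beq_iff_eq] at * <;> omega

theorem idxOf?_of_mem (l : List Char) (c : Char) (h : c ∈ l) :
    List.idxOf? c l = some (l.idxOf c) := by
  induction l with
  | nil => simp at h
  | cons y ys ihy =>
    by_cases hy : y = c
    · subst hy; simp [List.idxOf?_cons]
    · have hc' : c ∈ ys := by cases h with | head => exact absurd rfl hy | tail _ h2 => exact h2
      rw [List.idxOf?_cons, List.idxOf_cons]
      simp [show (y == c) = false by simp [hy], ihy hc']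

theorem idxOf_resid (s0 : List Char) (n : Nat) (S : List Nat) (c : Char)
    (hc : c ∈ s0) (hI : (n + s0.idxOf c) ∉ S) (hnd : S.Nodup) :
    (resid s0 n S).idxOf c + S.countP (fun p => decide (n ≤ p ∧ p < n + s0.idxOf c)) = s0.idxOf c := by
  induction s0 generalizing n with
  | nil => simp at hc
  | cons x xs ih =>
    rw [resid_cons]
    by_cases hx : x = c
    · subst hx
      have h0 : (x :: xs).idxOf x = 0 := by simp
      rw [h0] at hI ⊢
      simp only [Nat.add_zero] at hI
      have hz : S.countP (fun p => decide (n ≤ p ∧ p < n + 0)) = 0 :=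
        List.countP_eq_zero.2 (fun p _ => by simp)
      rw [if_neg hI, List.singleton_append, List.idxOf_cons, hz]
      simp
    · have h1 : (x :: xs).idxOf c = xs.idxOf c + 1 := by
        simp [List.idxOf_cons, show (x == c) = false by simp [hx]]
      rw [h1] at hI ⊢
      have hc' : c ∈ xs := by cases hc with | head => exact absurd rfl hx | tail _ h => exact h
      have hI' : (n + 1 + xs.idxOf c) ∉ S := by
        intro h; exact hI (by rw [show n + (xs.idxOf c + 1) = n + 1 + xs.idxOf c by omega]; exact h)
      have hIH := ih (n + 1) hc' hI'
      rw [show n + 1 + xs.idxOf c = n + (xs.idxOf c + 1) from by omega] at hIH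
      have hsplit := countP_window_split S n (n + (xs.idxOf c + 1)) (by omega)
      by_cases hn : n ∈ S
      · rw [if_pos hn, List.nil_append, hsplit, List.count_eq_one_of_mem hnd hn]
        omega
      · rw [if_neg hn, hsplit, List.count_eq_zero_of_not_mem hn, List.singleton_append,
          List.idxOf_cons, show (x == c) = false from by simp [hx]]
        simp only [cond_false]
        omega

theorem erase_resid (s0 : List Char) (n : Nat) (S : List Nat) (c : Char)
    (hc : c ∈ s0) (hI : (n + s0.idxOf c) ∉ S) :
    (resid s0 n S).erase c = resid s0 n ((n + s0.idxOf c) :: S) := by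
  induction s0 generalizing n with
  | nil => simp at hc
  | cons x xs ih =>
    rw [resid_cons, resid_cons]
    by_cases hx : x = c
    · subst hx
      have h0 : (x :: xs).idxOf x = 0 := by simp
      rw [h0] at hI ⊢
      simp only [Nat.add_zero] at hI ⊢
      rw [if_neg hI, if_pos List.mem_cons_self, List.singleton_append, List.erase_cons_head,
        List.nil_append]
      exact resid_congr xs (n+1) S (n :: S) (fun p hp =>
        ⟨fun h => List.mem_cons_of_mem _ h,
         fun h => (List.mem_cons.1 h).elim (fun he => absurd he (by omega)) id⟩)
    · have h1 : (x :: xs).idxOf c = xs.idxOf c + 1 := by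
        simp [List.idxOf_cons, show (x == c) = false by simp [hx]]
      rw [h1] at hI ⊢
      have hc' : c ∈ xs := by cases hc with | head => exact absurd rfl hx | tail _ h => exact h
      have hI' : (n + 1 + xs.idxOf c) ∉ S := by
        intro h; exact hI (by rw [show n + (xs.idxOf c + 1) = n + 1 + xs.idxOf c by omega]; exact h)
      have hIH := ih (n + 1) hc' hI'
      rw [show n + 1 + xs.idxOf c = n + (xs.idxOf c + 1) from by omega] at hIH
      by_cases hn : n ∈ S
      · rw [if_pos hn, if_pos (List.mem_cons_of_mem _ hn), List.nil_append, List.nil_append]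
        exact hIH
      · have hn' : n ∉ (n + (xs.idxOf c + 1)) :: S := fun h =>
          (List.mem_cons.1 h).elim (fun he => by omega) hn
        rw [if_neg hn, if_neg hn', List.singleton_append, List.singleton_append,
          List.erase_cons_tail (by simp [hx]), hIH]

theorem resid_zero_nil (s0 : List Char) (n : Nat) : resid s0 n [] = s0 := by
  induction s0 generalizing n with
  | nil => rfl
  | cons x xs ih => rw [resid_cons]; simp [ih]

theorem take_app (d r : List Char) (q : Nat) : (d ++ r).take (d.length + q) = d ++ r.take q := by
  rw [List.take_append]
  congr 1
  · exact List.take_of_length_le (by omega)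
  · congr 1; omega

theorem drop_app (d r : List Char) (q : Nat) : (d ++ r).drop (d.length + q) = r.drop q := by
  rw [List.drop_append]
  rw [List.drop_of_length_le (by omega), List.nil_append]
  congr 1; omega

theorem erase_eq_take_drop (r : List Char) (c : Char) (h : c ∈ r) :
    r.erase c = r.take (r.idxOf c) ++ r.drop (r.idxOf c + 1) := by
  rw [List.erase_eq_eraseIdx, idxOf?_of_mem r c h]
  exact List.eraseIdx_eq_take_drop_succ r _

theorem index?_append_left_of_not_mem (d r : List Char) (c : Char) (hd : c ∉ d) (hr : c ∈ r) :
    PySem.List.index? (d ++ r) c = some (d.length + r.idxOf c) := by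
  induction d with
  | nil =>
    simp only [List.nil_append, List.length_nil, Nat.zero_add]
    rw [PySem.List.index?_eq_idxOf?]
    exact idxOf?_of_mem r c hr
  | cons a d ihd =>
    have ha : a ≠ c := fun h => hd (h ▸ List.mem_cons_self)
    have hd' : c ∉ d := fun h => hd (List.mem_cons_of_mem _ h)
    rw [PySem.List.index?_eq_idxOf?] at ihd ⊢
    rw [List.cons_append, List.idxOf?_cons]
    simp [show (a == c) = false by simp [ha], ihd hd']
    omega

theorem idxOf_inj (s0 : List Char) (a b : Char) (ha : a ∈ s0) (hb : b ∈ s0)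
    (h : s0.idxOf a = s0.idxOf b) : a = b := by
  have hla := List.idxOf_lt_length_of_mem ha
  have hlb := List.idxOf_lt_length_of_mem hb
  have h1 := List.getElem_idxOf hla
  have h2 := List.getElem_idxOf hlb
  rw [← h1, ← h2]
  simp only [h]

-- the main loop invariant: A's simulation state is d ++ resid, B's done list the image of d
theorem main_inv (s0 : List Char) (cs : List Char) :
    ∀ (d : List Char) (res : Int),
    (d ++ cs).Nodup →
    (∀ c ∈ cs, c ∈ s0) →
    (∀ c ∈ d, c ∈ s0) →
    solveLoop (PySem.List.enumerate cs (d.length : Int))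
        (d ++ resid s0 0 (d.map (fun k => s0.idxOf k))) res
      = altLoop (cs.map (fun c => (s0.idxOf c : Int)))
          (d.map (fun c => (s0.idxOf c : Int))) res := by
  induction cs with
  | nil => intro d res _ _ _; simp [solveLoop, altLoop, PySem.List.enumerate]
  | cons c cs ih =>
    intro d res hnd hcs hds
    obtain ⟨ndd, ndccs, disj⟩ := List.nodup_append.1 hnd
    have hcd : c ∉ d := fun h => disj c h c List.mem_cons_self rfl
    have hcs0 : c ∈ s0 := hcs c List.mem_cons_self
    have hndS : (d.map (fun k => s0.idxOf k)).Nodup :=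
      ndd.map_on (fun a ha b hb hab => idxOf_inj s0 a b (hds a ha) (hds b hb) hab)
    have hIS : (0 + s0.idxOf c) ∉ d.map (fun k => s0.idxOf k) := by
      intro hmem
      obtain ⟨k, hk, hkeq⟩ := List.mem_map.1 hmem
      have : k = c := idxOf_inj s0 k c (hds k hk) hcs0 (by omega)
      exact hcd (this ▸ hk)
    have hmemr : c ∈ resid s0 0 (d.map (fun k => s0.idxOf k)) :=
      mem_resid s0 0 _ c hcs0 hIS
    set S := d.map (fun k => s0.idxOf k) with hSdef
    set r := resid s0 0 S with hrdef
    set q := r.idxOf c with hqdef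
    -- A side: one step
    rw [PySem.List.enumerate_cons]
    simp only [solveLoop, index?_append_left_of_not_mem d r c hcd hmemr]
    rw [← hqdef]
    rw [show ((d.length + q : Nat) : Int) + 1 = ((d.length + q + 1 : Nat) : Int) from by push_cast; ring]
    rw [PySem.List.slice_to_natCast (d ++ r) (d.length + q),
      PySem.List.slice_from_natCast (d ++ r) (d.length + q + 1), take_app,
      show d.length + q + 1 = d.length + (q + 1) from by omega, drop_app]
    rw [PySem.List.slice_to_natCast _ d.length, PySem.List.slice_from_natCast _ d.length]
    rw [List.append_assoc d (r.take q) (r.drop (q + 1))]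
    rw [show d ++ (r.take q ++ r.drop (q + 1)) = d ++ r.erase c from by
        rw [erase_eq_take_drop r c hmemr, hqdef]]
    rw [List.take_left, List.drop_left]
    -- rebuild the invariant state for d ++ [c]
    have hstate : d ++ [c] ++ r.erase c
        = (d ++ [c]) ++ resid s0 0 ((d ++ [c]).map (fun k => s0.idxOf k)) := by
      rw [hrdef, erase_resid s0 0 S c hcs0 hIS]
      congr 1
      rw [List.map_append, List.map_singleton]
      exact resid_congr s0 0 _ _ (fun p _ => by
        rw [hSdef]; simp [List.mem_append]; exact or_comm)
    rw [hstate]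
    -- B side: one step
    rw [List.map_cons]
    simp only [altLoop]
    -- identify the counts
    have hmapS : d.map (fun c => (s0.idxOf c : Int)) = S.map (fun p : Nat => (p : Int)) := by
      rw [hSdef, List.map_map]; rfl
    have hcnt : (d.map (fun c => (s0.idxOf c : Int))).countP (fun k => decide (k < (s0.idxOf c : Int)))
        = S.countP (fun p => decide (0 ≤ p ∧ p < 0 + s0.idxOf c)) := by
      rw [hmapS, List.countP_map]
      exact List.countP_congr (fun x _ => by simp)
    have hq := idxOf_resid s0 0 S c hcs0 hIS hndS
    rw [← hrdef, ← hqdef] at hq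
    -- the two accumulators agree
    have hacc : res + (((d.length + q : Nat) : Int) - (d.length : Int))
        = res + ((s0.idxOf c : Int)
            - ((d.map (fun c => (s0.idxOf c : Int))).countP (fun k => decide (k < (s0.idxOf c : Int))) : Int)) := by
      rw [hcnt]; push_cast; omega
    rw [hacc]
    -- apply the induction hypothesis at d ++ [c]
    have hnd' : ((d ++ [c]) ++ cs).Nodup := by
      rw [List.append_assoc, List.singleton_append]; exact hnd
    have hds' : ∀ x ∈ d ++ [c], x ∈ s0 := fun x hx =>
      (List.mem_append.1 hx).elim (hds x) (fun h => by
        rw [List.mem_singleton.1 h]; exact hcs0)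
    have := ih (d ++ [c]) (res + ((s0.idxOf c : Int)
      - ((d.map (fun c => (s0.idxOf c : Int))).countP (fun k => decide (k < (s0.idxOf c : Int))) : Int)))
      hnd' (fun x hx => hcs x (List.mem_cons_of_mem _ hx)) hds'
    rw [List.length_append, List.length_singleton] at this
    rw [show (d.length : Int) + 1 = ((d.length + 1 : Nat) : Int) from by push_cast; ring]
    rw [this, List.map_append, List.map_singleton]

-- ===== VERDICT (by name: the statement is the Claim_ definition above) =====
theorem solve_spec : Claim_equal_solve := by
  intro s _ hpre0
  have hpre : ∀ c ∈ "atcoder".toList, c ∈ s.toList := by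
    have h := hpre0
    unfold Pre_solve at h
    rw [List.all_eq_true] at h
    intro c hc
    simpa using h c hc
  unfold Spec_solve solve solve_alt
  have hnodup : ("atcoder".toList).Nodup := by decide
  have h := main_inv s.toList "atcoder".toList [] 0 (by simp only [List.nil_append]; exact hnodup)
    (fun c hc => hpre c hc) (by simp)
  simp only [List.length_nil, Nat.cast_zero, List.map_nil, List.nil_append,
    resid_zero_nil] at h
  rw [h]
  congr 1
  apply List.map_congr_left
  intro c hc
  rw [PySem.List.index?_eq_idxOf?, idxOf?_of_mem s.toList c (hpre c hc)]
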